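-- pv_equiv track=rewrite | github.com/newnamelsl/project | text_enroll_md-share_clean/preprocess/aishell2_kespeech_mandarin/cut_head_100_1channel_100k_aishell/aishell_100k_word_seg/version_kaldi_ipa/forced_alignment_cut/data_process/cut_datalist_by_timestamp.py | merge_segments_by_second_dimension
-- ===== SOURCE A (Python) =====
-- def merge_segments_by_second_dimension(segment_label, seg_timestamp_list, min_second_dim_length=2):
--     """
--     将segment_label第一个维度上相邻元素适当组合
--     条件：合并后第二个维度长度之和 >= min_second_dim_length
--     策略：
--     1. 避免最后一个元素单独成组且未达阈值
--     2. 一旦达到阈值，在满足需求1的前提下，就不要再继续组合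
--     segment_label: 三维数组 [[[a,b], [c,d]], [[e]], [[f,g]], ...]
--     min_second_dim_length: 第二个维度长度阈值，默认为2
--     返回: [(merged_segment_label, merged_timestamp, start_idx, end_idx), ...]
--     """
--     merged_segments = []
--     i = 0
--
--     while i < len(segment_label):
--         # 从当前位置开始，尝试合并相邻的segments
--         current_merged = []
--         current_timestamp = []
--         current_second_dim_total_length = 0
--         start_idx = i
--
--         # 计算剩余元素的总长度，用于判断是否需要继续合并
--         remaining_length = sum(len(segment_label[j]) for j in range(i, len(segment_label)))
--
--         # 合并segments直到第二个维度长度之和 >= min_second_dim_length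
--         while i < len(segment_label):
--             # 将当前segment添加到合并列表中
--             current_merged.append(segment_label[i])
--             current_timestamp.append(seg_timestamp_list[i])
--
--             # 计算当前segment的第二个维度长度（即len(segment_label[i])）
--             current_seg_second_dim_length = len(segment_label[i])
--             current_second_dim_total_length += current_seg_second_dim_length
--
--             # 检查是否达到阈值
--             if current_second_dim_total_length >= min_second_dim_length:
--                 # 达到阈值，检查是否需要继续合并以满足需求1
--                 remaining_after_current = sum(len(segment_label[j]) for j in range(i + 1, len(segment_label)))
--
--                 # 如果剩余元素长度 < 阈值，需要继续合并以避免最后一个元素单独成组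
--                 if remaining_after_current > 0 and remaining_after_current < min_second_dim_length:
--                     # 继续合并下一个元素
--                     i += 1
--                     continue
--                 else:
--                     # 可以安全停止合并
--                     break
--             i += 1
--
--         # 创建合并
--         merged_segments.append((
--             current_merged,
--             current_timestamp,
--             start_idx,
--             i
--         ))
--         i += 1
--
--     return merged_segments
-- ===== SOURCE B (Python) =====
-- def merge_segments_by_second_dimension(segment_label, seg_timestamp_list, min_second_dim_length=2):
--     n = len(segment_label)
--     # suffix[k] = total second-dimension length of segments k..n-1, computed once up front
--     suffix = [0] * (n + 1)
--     for j in range(n - 1, -1, -1):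
--         suffix[j] = suffix[j + 1] + len(segment_label[j])
--     merged_segments = []
--     start = 0
--     while start < n:
--         e = start
--         while e < n:
--             consumed = suffix[start] - suffix[e + 1]
--             rem = suffix[e + 1]
--             if consumed >= min_second_dim_length and not (0 < rem < min_second_dim_length):
--                 break
--             e += 1
--         last = e if e < n else n - 1
--         merged_segments.append((segment_label[start:last + 1],
--                                 seg_timestamp_list[start:last + 1],
--                                 start, e))
--         start = e + 1
--     return merged_segments
-- ===== Notes on version B (the rewrite author's own statement) =====
-- stated objective: alternative
-- what changed: B precomputes a suffix-sum array of segment lengths once and emits each group as a list slice, replacing A's repeated generator sums over the tail and per-element list appends.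
-- outside the precondition, e.g. on merge_segments_by_second_dimension([[[1]], [[2]]], [], 2): A raises IndexError, B returns [([[[1]], [[2]]], [], 0, 1)]
import Mathlib
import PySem

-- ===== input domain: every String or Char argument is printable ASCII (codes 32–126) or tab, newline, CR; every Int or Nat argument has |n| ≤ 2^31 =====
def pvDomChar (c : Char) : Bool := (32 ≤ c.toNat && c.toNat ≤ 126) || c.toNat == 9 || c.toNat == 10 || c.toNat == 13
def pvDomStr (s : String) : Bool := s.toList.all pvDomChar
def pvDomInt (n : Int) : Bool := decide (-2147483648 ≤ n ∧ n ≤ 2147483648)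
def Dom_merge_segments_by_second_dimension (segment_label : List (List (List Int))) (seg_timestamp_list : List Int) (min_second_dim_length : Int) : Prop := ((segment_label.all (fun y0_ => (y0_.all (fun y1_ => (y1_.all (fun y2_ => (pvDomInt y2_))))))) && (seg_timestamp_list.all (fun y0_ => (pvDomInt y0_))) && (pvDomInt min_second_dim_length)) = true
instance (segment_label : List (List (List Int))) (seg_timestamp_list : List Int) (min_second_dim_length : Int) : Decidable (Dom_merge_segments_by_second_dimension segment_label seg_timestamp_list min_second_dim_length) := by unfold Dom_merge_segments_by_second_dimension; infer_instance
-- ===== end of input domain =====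

-- B precomputes a suffix-sum array once and emits each group as a slice, instead of A's repeated
-- generator sums over the tail and per-element appends (an alternative, single-array formulation).
-- Loops are ported as structural recursion on a fuel argument that provably suffices (fuel = list length).

-- ===== PORT A =====
-- sum(len(segment_label[j]) for j in range(a, len(segment_label))); fuel ≥ length - a suffices
def pvA_sumFrom : Nat → List (List (List Int)) → Nat → Int
  | 0, _, _ => 0
  | fuel + 1, sl, a =>
    if h : a < sl.length then (sl[a].length : Int) + pvA_sumFrom fuel sl (a + 1) else 0

-- A's inner while loop; returns (current_merged, current_timestamp, final i); fuel ≥ length - i suffices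
def pvA_inner : Nat → List (List (List Int)) → List Int → Int → Nat →
    List (List (List Int)) → List Int → Int → List (List (List Int)) × List Int × Nat
  | 0, _, _, _, i, cm, ct, _ => (cm, ct, i)
  | fuel + 1, sl, ts, minL, i, cm, ct, tot =>
    if h : i < sl.length then
      let cm' := cm ++ [sl[i]]
      -- seg_timestamp_list[i]: Python raises IndexError when i ≥ ts.length; Pre_ excludes that
      let ct' := ct ++ [(PySem.List.pyGet? ts (Int.ofNat i)).getD 0]
      let tot' := tot + (sl[i].length : Int)
      if minL ≤ tot' then
        let rem := pvA_sumFrom sl.length sl (i + 1)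
        if 0 < rem ∧ rem < minL then pvA_inner fuel sl ts minL (i + 1) cm' ct' tot'
        else (cm', ct', i)
      else pvA_inner fuel sl ts minL (i + 1) cm' ct' tot'
    else (cm, ct, i)

-- A's outer while loop; fuel ≥ length - i suffices
def pvA_outer : Nat → List (List (List Int)) → List Int → Int → Nat →
    List (List (List (List Int)) × List Int × Int × Int)
  | 0, _, _, _, _ => []
  | fuel + 1, sl, ts, minL, i =>
    if h : i < sl.length then
      let _remaining := pvA_sumFrom sl.length sl i
      let r := pvA_inner sl.length sl ts minL i [] [] 0
      (r.1, r.2.1, (i : Int), (r.2.2 : Int)) :: pvA_outer fuel sl ts minL (r.2.2 + 1)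
    else []

def merge_segments_by_second_dimension (segment_label : List (List (List Int))) (seg_timestamp_list : List Int) (min_second_dim_length : Int) : List (List (List (List Int)) × List Int × Int × Int) :=
  pvA_outer segment_label.length segment_label seg_timestamp_list min_second_dim_length 0

-- ===== PORT B =====
-- suffix[k] = total length from k on, built back-to-front (Source B's reversed for-loop)
def pvB_suffix : List (List (List Int)) → List Int
  | [] => [0]
  | x :: xs =>
    let s := pvB_suffix xs
    ((x.length : Int) + s.headD 0) :: s

-- Source B's inner scan for the group end; fuel ≥ n - e suffices
def pvB_findEnd : Nat → List Int → Int → Int → Nat → Nat → Nat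
  | 0, _, _, _, e, _ => e
  | fuel + 1, suffix, minL, s0, e, n =>
    if h : e < n then
      let consumed := s0 - suffix.getD (e + 1) 0
      let rem := suffix.getD (e + 1) 0
      if minL ≤ consumed ∧ ¬(0 < rem ∧ rem < minL) then e
      else pvB_findEnd fuel suffix minL s0 (e + 1) n
    else e

-- Source B's outer loop, emitting each group as a slice; fuel ≥ length - start suffices
def pvB_outer : Nat → List (List (List Int)) → List Int → List Int → Int → Nat →
    List (List (List (List Int)) × List Int × Int × Int)
  | 0, _, _, _, _, _ => []
  | fuel + 1, sl, ts, suffix, minL, start =>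
    if h : start < sl.length then
      let e := pvB_findEnd sl.length suffix minL (suffix.getD start 0) start sl.length
      let last := if e < sl.length then e else sl.length - 1
      (PySem.List.slice sl (some (start : Int)) (some ((last + 1 : Nat) : Int)),
       PySem.List.slice ts (some (start : Int)) (some ((last + 1 : Nat) : Int)),
       (start : Int), (e : Int)) :: pvB_outer fuel sl ts suffix minL (e + 1)
    else []

def merge_segments_by_second_dimension_alt (segment_label : List (List (List Int))) (seg_timestamp_list : List Int) (min_second_dim_length : Int) : List (List (List (List Int)) × List Int × Int × Int) :=
  pvB_outer segment_label.length segment_label seg_timestamp_list (pvB_suffix segment_label) min_second_dim_length 0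

-- ===== PRECONDITION & SPEC =====
-- Pre_ excludes exactly the inputs where A raises IndexError: seg_timestamp_list shorter
-- than segment_label (A indexes seg_timestamp_list[i] for every i below len(segment_label)).
def Pre_merge_segments_by_second_dimension (segment_label : List (List (List Int))) (seg_timestamp_list : List Int) (min_second_dim_length : Int) : Prop :=
  segment_label.length ≤ seg_timestamp_list.length
instance (segment_label : List (List (List Int))) (seg_timestamp_list : List Int) (min_second_dim_length : Int) : Decidable (Pre_merge_segments_by_second_dimension segment_label seg_timestamp_list min_second_dim_length) := by unfold Pre_merge_segments_by_second_dimension; infer_instance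

def pvWitness_merge_segments_by_second_dimension : List (List (List Int)) × List Int × Int :=
  ([[[1]]], [0], 2)

def Spec_merge_segments_by_second_dimension (segment_label : List (List (List Int))) (seg_timestamp_list : List Int) (min_second_dim_length : Int) (out : List (List (List (List Int)) × List Int × Int × Int)) : Prop := out = merge_segments_by_second_dimension_alt segment_label seg_timestamp_list min_second_dim_length
instance (segment_label : List (List (List Int))) (seg_timestamp_list : List Int) (min_second_dim_length : Int) (out : List (List (List (List Int)) × List Int × Int × Int)) : Decidable (Spec_merge_segments_by_second_dimension segment_label seg_timestamp_list min_second_dim_length out) := by unfold Spec_merge_segments_by_second_dimension; infer_instance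

-- ===== CLAIM (what is proved, stated in full; the proofs are below) =====
def Claim_equal_merge_segments_by_second_dimension : Prop := ∀ (segment_label : List (List (List Int))) (seg_timestamp_list : List Int) (min_second_dim_length : Int), Dom_merge_segments_by_second_dimension segment_label seg_timestamp_list min_second_dim_length → Pre_merge_segments_by_second_dimension segment_label seg_timestamp_list min_second_dim_length → Spec_merge_segments_by_second_dimension segment_label seg_timestamp_list min_second_dim_length (merge_segments_by_second_dimension segment_label seg_timestamp_list min_second_dim_length)

-- ===== LEMMAS AND PROOFS =====

-- closed form of A's generator sum (for sufficient fuel)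
lemma sumFrom_eq : ∀ (fuel : Nat) (sl : List (List (List Int))) (a : Nat),
    sl.length - a ≤ fuel →
    pvA_sumFrom fuel sl a = ((sl.drop a).map (fun x => (x.length : Int))).sum := by
  intro fuel
  induction fuel with
  | zero =>
    intro sl a hm
    have h : ¬ a < sl.length := by omega
    simp [pvA_sumFrom, List.drop_eq_nil_of_le (by omega : sl.length ≤ a)]
  | succ fuel ih =>
    intro sl a hm
    by_cases h : a < sl.length
    · have hdrop : sl.drop a = sl[a] :: sl.drop (a + 1) := List.drop_eq_getElem_cons h
      simp only [pvA_sumFrom, h, dif_pos, ih sl (a + 1) (by omega), hdrop, List.map_cons,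
        List.sum_cons]
    · simp [pvA_sumFrom, h, List.drop_eq_nil_of_le (by omega : sl.length ≤ a)]

-- B's suffix array looked up at k is exactly the tail sum from k
lemma suffix_getD (sl : List (List (List Int))) :
    ∀ k, (pvB_suffix sl).getD k 0 = ((sl.drop k).map (fun x => (x.length : Int))).sum := by
  induction sl with
  | nil => intro k; cases k <;> simp [pvB_suffix]
  | cons x xs ih =>
    intro k
    cases k with
    | zero =>
      have hhead : (pvB_suffix xs).headD 0 = (pvB_suffix xs).getD 0 0 := by
        cases h : pvB_suffix xs <;> simp [List.getD]
      simp only [pvB_suffix, List.getD_cons_zero, hhead, ih 0, List.drop_zero, List.map_cons,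
        List.sum_cons]
    | succ k =>
      simp only [pvB_suffix, List.getD_cons_succ, ih k, List.drop_succ_cons]

lemma findEnd_ge (suffix : List Int) (minL s0 : Int) :
    ∀ fuel e n, e ≤ pvB_findEnd fuel suffix minL s0 e n := by
  intro fuel
  induction fuel with
  | zero => intro e n; simp [pvB_findEnd]
  | succ fuel ih =>
    intro e n
    simp only [pvB_findEnd]
    split_ifs with h h1
    · exact le_refl e
    · exact le_trans (by omega) (ih (e + 1) n)
    · exact le_refl e

-- abbreviation used only in the proofs below
def tailSum (sl : List (List (List Int))) (a : Nat) : Int :=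
  ((sl.drop a).map (fun x => (x.length : Int))).sum

-- the core correspondence: A's inner loop = B's findEnd + a slice of the input
lemma inner_eq (sl : List (List (List Int))) (ts : List Int) (minL : Int)
    (hts : sl.length ≤ ts.length) :
    ∀ fuel g i cm ct tot, sl.length - i ≤ fuel → sl.length - i ≤ g →
      pvA_inner fuel sl ts minL i cm ct tot =
        (let e := pvB_findEnd g (pvB_suffix sl) minL (tot + tailSum sl i) i sl.length
         let l := if e < sl.length then e + 1 else sl.length
         (cm ++ (sl.drop i).take (l - i), ct ++ (ts.drop i).take (l - i), e)) := by
  intro fuel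
  induction fuel with
  | zero =>
    intro g i cm ct tot hm hg
    have h : ¬ i < sl.length := by omega
    have hd : sl.length - i = 0 := by omega
    cases g with
    | zero => simp [pvA_inner, pvB_findEnd, h, hd]
    | succ g => simp [pvA_inner, pvB_findEnd, h, hd]
  | succ fuel ih =>
    intro g i cm ct tot hm hg
    by_cases h : i < sl.length
    · obtain ⟨g', rfl⟩ : ∃ g', g = g' + 1 := ⟨g - 1, by omega⟩
      have hts_i : i < ts.length := by omega
      have hdrop : sl.drop i = sl[i] :: sl.drop (i + 1) := List.drop_eq_getElem_cons h
      have hdropt : ts.drop i = ts[i] :: ts.drop (i + 1) := List.drop_eq_getElem_cons hts_i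
      have hsum : tailSum sl i = (sl[i].length : Int) + tailSum sl (i + 1) := by
        unfold tailSum
        rw [hdrop, List.map_cons, List.sum_cons]
      have hgetD : (pvB_suffix sl).getD (i + 1) 0 = tailSum sl (i + 1) := suffix_getD sl (i + 1)
      have harith : tot + tailSum sl i - tailSum sl (i + 1) = tot + (sl[i].length : Int) := by
        rw [hsum]; ring
      have hrem : pvA_sumFrom sl.length sl (i + 1) = tailSum sl (i + 1) :=
        sumFrom_eq sl.length sl (i + 1) (by omega)
      have hct : (PySem.List.pyGet? ts (Int.ofNat i)).getD 0 = ts[i] := by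
        simp [PySem.List.pyGet?, PySem.List.pyIdx?, hts_i]
      by_cases h1 : minL ≤ tot + (sl[i].length : Int)
      · by_cases h2 : 0 < tailSum sl (i + 1) ∧ tailSum sl (i + 1) < minL
        · -- threshold met but tail too short: both sides continue merging
          have hE : pvB_findEnd (g' + 1) (pvB_suffix sl) minL (tot + tailSum sl i) i sl.length
              = pvB_findEnd g' (pvB_suffix sl) minL (tot + tailSum sl i) (i + 1) sl.length := by
            simp only [pvB_findEnd, h, dif_pos, hgetD, harith]
            rw [if_neg (fun hc => hc.2 h2)]
          simp only [pvA_inner, h, dif_pos, hct, hrem]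
          rw [if_pos h1, if_pos h2,
            ih g' (i + 1) (cm ++ [sl[i]]) (ct ++ [ts[i]]) (tot + (sl[i].length : Int))
              (by omega) (by omega)]
          have hs0 : tot + (sl[i].length : Int) + tailSum sl (i + 1) = tot + tailSum sl i := by
            rw [hsum]; ring
          simp only [hE, hs0]
          have hge : i + 1 ≤ pvB_findEnd g' (pvB_suffix sl) minL
              (tot + tailSum sl i) (i + 1) sl.length := findEnd_ge _ _ _ g' (i + 1) sl.length
          set e := pvB_findEnd g' (pvB_suffix sl) minL (tot + tailSum sl i) (i + 1) sl.length
            with he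
          set l := if e < sl.length then e + 1 else sl.length with hldef
          have hl : i + 1 ≤ l := by rw [hldef]; split_ifs <;> omega
          have hli : l - i = (l - (i + 1)) + 1 := by omega
          simp only [hdrop, hdropt, hli, List.take_succ_cons, List.append_assoc,
            List.singleton_append]
        · -- stop: threshold met and no forced continuation
          have hE : pvB_findEnd (g' + 1) (pvB_suffix sl) minL (tot + tailSum sl i) i sl.length
              = i := by
            simp only [pvB_findEnd, h, dif_pos, hgetD, harith]
            rw [if_pos ⟨h1, h2⟩]
          simp only [pvA_inner, h, dif_pos, hct, hrem]
          rw [if_pos h1, if_neg h2]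
          simp only [hE, if_pos h]
          have ht1 : i + 1 - i = 1 := by omega
          simp only [hdrop, hdropt, ht1, List.take_succ_cons, List.take_zero]
      · -- threshold not yet met: both sides continue
        have hE : pvB_findEnd (g' + 1) (pvB_suffix sl) minL (tot + tailSum sl i) i sl.length
            = pvB_findEnd g' (pvB_suffix sl) minL (tot + tailSum sl i) (i + 1) sl.length := by
          simp only [pvB_findEnd, h, dif_pos, hgetD, harith]
          rw [if_neg (fun hc => h1 hc.1)]
        simp only [pvA_inner, h, dif_pos, hct, hrem]
        rw [if_neg h1,
          ih g' (i + 1) (cm ++ [sl[i]]) (ct ++ [ts[i]]) (tot + (sl[i].length : Int))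
            (by omega) (by omega)]
        have hs0 : tot + (sl[i].length : Int) + tailSum sl (i + 1) = tot + tailSum sl i := by
          rw [hsum]; ring
        simp only [hE, hs0]
        have hge : i + 1 ≤ pvB_findEnd g' (pvB_suffix sl) minL
            (tot + tailSum sl i) (i + 1) sl.length := findEnd_ge _ _ _ g' (i + 1) sl.length
        set e := pvB_findEnd g' (pvB_suffix sl) minL (tot + tailSum sl i) (i + 1) sl.length
          with he
        set l := if e < sl.length then e + 1 else sl.length with hldef
        have hl : i + 1 ≤ l := by rw [hldef]; split_ifs <;> omega
        have hli : l - i = (l - (i + 1)) + 1 := by omega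
        simp only [hdrop, hdropt, hli, List.take_succ_cons, List.append_assoc,
          List.singleton_append]
    · have hd : sl.length - i = 0 := by omega
      cases g with
      | zero => simp [pvA_inner, pvB_findEnd, h, hd]
      | succ g => simp [pvA_inner, pvB_findEnd, h, hd]

lemma outer_eq (sl : List (List (List Int))) (ts : List Int) (minL : Int)
    (hts : sl.length ≤ ts.length) :
    ∀ fuel g i, sl.length - i ≤ fuel → sl.length - i ≤ g →
      pvA_outer fuel sl ts minL i = pvB_outer g sl ts (pvB_suffix sl) minL i := by
  intro fuel
  induction fuel with
  | zero =>
    intro g i hm hg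
    have h : ¬ i < sl.length := by omega
    cases g with
    | zero => simp [pvA_outer, pvB_outer]
    | succ g => simp [pvA_outer, pvB_outer, h]
  | succ fuel ih =>
    intro g i hm hg
    by_cases h : i < sl.length
    · obtain ⟨g', rfl⟩ : ∃ g', g = g' + 1 := ⟨g - 1, by omega⟩
      simp only [pvA_outer, pvB_outer, h, dif_pos]
      rw [inner_eq sl ts minL hts sl.length sl.length i [] [] 0 (by omega) (by omega)]
      have hs0 : (0 : Int) + tailSum sl i = (pvB_suffix sl).getD i 0 := by
        rw [suffix_getD]; simp [tailSum]
      rw [hs0]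
      set e := pvB_findEnd sl.length (pvB_suffix sl) minL ((pvB_suffix sl).getD i 0) i sl.length
        with he
      have hge : i ≤ e := findEnd_ge _ _ _ sl.length i sl.length
      have hlast : (if e < sl.length then e else sl.length - 1) + 1
          = (if e < sl.length then e + 1 else sl.length) := by
        split_ifs <;> omega
      have hslice1 : PySem.List.slice sl (some (i : Int))
          (some (((if e < sl.length then e else sl.length - 1) + 1 : Nat) : Int))
          = (sl.drop i).take ((if e < sl.length then e + 1 else sl.length) - i) := by
        rw [PySem.List.slice_natCast, hlast]
      have hslice2 : PySem.List.slice ts (some (i : Int))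
          (some (((if e < sl.length then e else sl.length - 1) + 1 : Nat) : Int))
          = (ts.drop i).take ((if e < sl.length then e + 1 else sl.length) - i) := by
        rw [PySem.List.slice_natCast, hlast]
      simp only [hslice1, hslice2, List.nil_append]
      rw [ih g' (e + 1) (by omega) (by omega)]
    · cases g with
      | zero => simp [pvA_outer, pvB_outer, h]
      | succ g => simp [pvA_outer, pvB_outer, h]

-- ===== VERDICT (by name: the statement is the Claim_ definition above) =====
theorem merge_segments_by_second_dimension_spec : Claim_equal_merge_segments_by_second_dimension := by
  intro sl ts minL _hdom hpre
  unfold Spec_merge_segments_by_second_dimension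
  unfold merge_segments_by_second_dimension merge_segments_by_second_dimension_alt
  exact outer_eq sl ts minL hpre sl.length sl.length 0 (by omega) (by omega)
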